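-- pv_equiv track=rewrite | github.com/Shreyab1802/Code_Python | MicrosoftRecent/Rice_Cultivation.py | solution
-- ===== SOURCE A (Python) =====
-- def solution(A):
--     N = len(A)
--     M = len(A[0])
--
--     max_area = 0
--     all_areas = []
--
--     # Find all vertical rectangles
--     for c in range(M):
--         start = None
--         for r in range(N):
--             if A[r][c] == '.':
--                 if start is None:
--                     start = r
--             else:
--                 if start is not None:
--                     all_areas.append((start, c, r - 1, c))
--                     start = None
--         if start is not None:
--             all_areas.append((start, c, N - 1, c))
--
--     # Find all horizontal rectangles
--     for r in range(N):
--         start = None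
--         for c in range(M):
--             if A[r][c] == '.':
--                 if start is None:
--                     start = c
--             else:
--                 if start is not None:
--                     all_areas.append((r, start, r, c - 1))
--                     start = None
--         if start is not None:
--             all_areas.append((r, start, r, M - 1))
--
--     # Calculate sizes of all areas
--     def area_size(r1, c1, r2, c2):
--         return (r2 - r1 + 1) * (c2 - c1 + 1)
--
--     all_areas = [(r1, c1, r2, c2, area_size(r1, c1, r2, c2)) for (r1, c1, r2, c2) in all_areas]
--     all_areas.sort(key=lambda x: -x[4])  # Sort areas by size in descending order
--
--     # Find the two largest non-overlapping areas
--     def is_non_overlapping(a, b):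
--         ar1, ac1, ar2, ac2, _ = a
--         br1, bc1, br2, bc2, _ = b
--         return ar2 < br1 or ar1 > br2 or ac2 < bc1 or ac1 > bc2
--
--     for i in range(len(all_areas)):
--         max_area = max(max_area, all_areas[i][4])
--         for j in range(i + 1, len(all_areas)):
--             if is_non_overlapping(all_areas[i], all_areas[j]):
--                 max_area = max(max_area, all_areas[i][4] + all_areas[j][4])
--                 break
--
--     return max_area
-- ===== SOURCE B (Python) =====
-- def solution(A):
--     N, M = len(A), len(A[0])
--
--     def runs(line):
--         out, start = [], None
--         for i, ch in enumerate(line):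
--             if ch == '.':
--                 if start is None:
--                     start = i
--             elif start is not None:
--                 out.append((start, i - 1))
--                 start = None
--         if start is not None:
--             out.append((start, len(line) - 1))
--         return out
--
--     rects = []
--     for c in range(M):
--         for s, e in runs([A[r][c] for r in range(N)]):
--             rects.append((s, c, e, c))
--     for r in range(N):
--         for s, e in runs([A[r][c] for c in range(M)]):
--             rects.append((r, s, r, e))
--
--     best = 0
--     for i, (ar1, ac1, ar2, ac2) in enumerate(rects):
--         ai = (ar2 - ar1 + 1) * (ac2 - ac1 + 1)
--         best = max(best, ai)
--         for (br1, bc1, br2, bc2) in rects[i + 1:]: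
--             if ar2 < br1 or ar1 > br2 or ac2 < bc1 or ac1 > bc2:
--                 best = max(best, ai + (br2 - br1 + 1) * (bc2 - bc1 + 1))
--     return best
-- ===== Notes on version B (the rewrite author's own statement) =====
-- stated objective: simpler
-- what changed: B extracts the empty strips with one shared run-finding helper and replaces A's sort-by-area-descending plus first-hit-and-break pairing phase with a plain all-pairs scan (max single-strip area, then every non-overlapping unordered pair), removing the sort and the ordering dependence entirely.
import Mathlib
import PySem

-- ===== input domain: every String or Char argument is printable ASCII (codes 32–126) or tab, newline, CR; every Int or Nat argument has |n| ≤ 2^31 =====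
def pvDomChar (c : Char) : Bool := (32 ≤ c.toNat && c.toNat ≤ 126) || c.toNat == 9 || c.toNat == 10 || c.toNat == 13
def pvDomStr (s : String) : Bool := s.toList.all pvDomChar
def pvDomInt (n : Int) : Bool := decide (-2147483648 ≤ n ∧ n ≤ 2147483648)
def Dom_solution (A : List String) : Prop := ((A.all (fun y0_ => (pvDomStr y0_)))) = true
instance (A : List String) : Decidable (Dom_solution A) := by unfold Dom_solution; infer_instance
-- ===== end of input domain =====

-- B replaces A's sort-by-area + first-hit/break pairing phase with a plain all-pairs scan
-- (max single strip area, then every non-overlapping unordered pair), and extracts the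
-- strips through one shared run-finding helper; objective: simpler/alternative, not faster.

abbrev R4 : Type := Int × Int × Int × Int
abbrev R5 : Type := Int × Int × Int × Int × Int

-- ===== PORT A =====

-- A[r][c] as an Option (none exactly where Python raises IndexError; Pre_ excludes that)
def pvCell (A : List String) (r c : Int) : Option Char :=
  match PySem.List.pyGet? A r with
  | none => none
  | some s => PySem.Str.pyGet? s c

-- body of A's inner scan loop ('if A[r][c] == '.': …  else: …'), state = (start, all_areas)
def stepA (f : Int → Option Char) (emb : Int × Int → R4)
    (q : Option Int × List R4) (r : Int) : Option Int × List R4 :=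
  if f r == some '.' then
    match q.1 with
    | none => (some r, q.2)
    | some s => (some s, q.2)
  else
    match q.1 with
    | none => (none, q.2)
    | some s => (none, q.2 ++ [emb (s, r - 1)])

-- A's 'if start is not None: all_areas.append(…)' after the inner loop
def finishA (emb : Int × Int → R4) (hi : Int) (p : Option Int × List R4) : List R4 :=
  match p with
  | (none, res) => res
  | (some s, res) => res ++ [emb (s, hi - 1)]

-- one inner 'for r in range(n)' scan of A, appending onto the shared all_areas list
def scanA (f : Int → Option Char) (emb : Int × Int → R4) (n : Int) (acc : List R4) : List R4 :=
  finishA emb n ((PySem.List.pyRange 0 n 1).foldl (stepA f emb) (none, acc))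

-- A's area_size helper
def area4 (x : R4) : Int := (x.2.2.1 - x.1 + 1) * (x.2.2.2 - x.2.1 + 1)

-- A's is_non_overlapping on 5-tuples (5th component ignored)
def nonov5 (a b : R5) : Bool :=
  decide (a.2.2.1 < b.1) || decide (a.1 > b.2.2.1) ||
  decide (a.2.2.2.1 < b.2.1) || decide (a.2.1 > b.2.2.2.1)

-- A's inner 'for j in range(i+1, …): if non_overlapping: max; break'
def innerA (a : R5) (m : Int) : List R5 → Int
  | [] => m
  | b :: t => if nonov5 a b then max m (a.2.2.2.2 + b.2.2.2.2) else innerA a m t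

-- A's outer 'for i in range(len(all_areas))' loop
def outerA : List R5 → Int → Int
  | [], m => m
  | a :: t, m => outerA t (innerA a (max m a.2.2.2.2) t)

def solution (A : List String) : Int :=
  let N : Int := PySem.List.len A
  let M : Int := match PySem.List.pyGet? A 0 with
                 | none => 0            -- Python raises here on A == []; excluded by Pre_
                 | some s => PySem.Str.len s
  let vert := (PySem.List.pyRange 0 M 1).foldl
      (fun acc c => scanA (fun r => pvCell A r c) (fun p => (p.1, c, p.2, c)) N acc) []
  let all := (PySem.List.pyRange 0 N 1).foldl
      (fun acc r => scanA (fun c => pvCell A r c) (fun p => (r, p.1, r, p.2)) M acc) vert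
  let all5 : List R5 := all.map (fun x => (x.1, x.2.1, x.2.2.1, x.2.2.2, area4 x))
  let sortedL := PySem.List.sorted all5 (fun z => -(z.2.2.2.2)) false
  outerA sortedL 0

-- ===== PORT B =====

-- B's runs(line): the enumerate loop as a recursion carrying the index
def runsGo (i : Int) (st : Option Int) (out : List (Int × Int)) :
    List (Option Char) → List (Int × Int)
  | [] =>
    match st with
    | none => out
    | some s => out ++ [(s, i - 1)]
  | ch :: rest =>
    if ch == some '.' then
      runsGo (i + 1) (match st with | none => some i | some s => some s) out rest
    else
      match st with
      | none => runsGo (i + 1) none out rest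
      | some s => runsGo (i + 1) none (out ++ [(s, i - 1)]) rest

def runsB (line : List (Option Char)) : List (Int × Int) := runsGo 0 none [] line

-- B's non-overlap test on the 4-tuples
def nonov4 (a b : R4) : Bool :=
  decide (a.2.2.1 < b.1) || decide (a.1 > b.2.2.1) ||
  decide (a.2.2.2 < b.2.1) || decide (a.2.1 > b.2.2.2)

-- B's all-pairs phase: enumerate + scan of rects[i+1:]
def pairLoop : List R4 → Int → Int
  | [], best => best
  | a :: t, best =>
    let ai := area4 a
    pairLoop t (t.foldl (fun b x => if nonov4 a x then max b (ai + area4 x) else b) (max best ai))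

def solution_alt (A : List String) : Int :=
  let N : Int := PySem.List.len A
  let M : Int := match PySem.List.pyGet? A 0 with
                 | none => 0            -- Python raises here on A == []; excluded by Pre_
                 | some s => PySem.Str.len s
  let vert := (PySem.List.pyRange 0 M 1).foldl
      (fun acc c => acc ++ (runsB ((PySem.List.pyRange 0 N 1).map (fun r => pvCell A r c))).map
        (fun p => (p.1, c, p.2, c))) []
  let rects := (PySem.List.pyRange 0 N 1).foldl
      (fun acc r => acc ++ (runsB ((PySem.List.pyRange 0 M 1).map (fun c => pvCell A r c))).map
        (fun p => (r, p.1, r, p.2))) vert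
  pairLoop rects 0

-- ===== PRECONDITION & SPEC =====
-- Python A evaluates A[0] and A[r][c] for all r < len(A), c < len(A[0]):
-- it raises IndexError iff A is empty or some row is shorter than row 0.
def Pre_solution (A : List String) : Prop :=
  A ≠ [] ∧ ∀ s ∈ A, PySem.Str.len (A.headD "") ≤ PySem.Str.len s
instance (A : List String) : Decidable (Pre_solution A) := by unfold Pre_solution; infer_instance

def pvWitness_solution : List String := ([".#", ".."])

def Spec_solution (A : List String) (out : Int) : Prop := out = solution_alt A
instance (A : List String) (out : Int) : Decidable (Spec_solution A out) := by
  unfold Spec_solution; infer_instance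

-- ===== CLAIM (what is proved, stated in full; the proofs are below) =====
def Claim_equal_solution : Prop :=
  ∀ (A : List String), Dom_solution A → Pre_solution A → Spec_solution A (solution A)

-- ===== LEMMAS AND PROOFS =====

def to5 (x : R4) : R5 := (x.1, x.2.1, x.2.2.1, x.2.2.2, area4 x)

-- the common strip list, in B's shape
def rectsOf (A : List String) : List R4 :=
  let N : Int := PySem.List.len A
  let M : Int := match PySem.List.pyGet? A 0 with
                 | none => 0
                 | some s => PySem.Str.len s
  let vert := (PySem.List.pyRange 0 M 1).foldl
      (fun acc c => acc ++ (runsB ((PySem.List.pyRange 0 N 1).map (fun r => pvCell A r c))).map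
        (fun p => (p.1, c, p.2, c))) []
  (PySem.List.pyRange 0 N 1).foldl
      (fun acc r => acc ++ (runsB ((PySem.List.pyRange 0 M 1).map (fun c => pvCell A r c))).map
        (fun p => (r, p.1, r, p.2))) vert

def wf4 (x : R4) : Prop := x.1 ≤ x.2.2.1 ∧ x.2.1 ≤ x.2.2.2

-- candidate values: 0, a single strip, or a non-overlapping pair of strips
def CandM (L : List R4) (v : Int) : Prop :=
  v = 0 ∨ (∃ x ∈ L, v = area4 x) ∨
  (∃ x ∈ L, ∃ y ∈ L, nonov4 x y = true ∧ v = area4 x + area4 y)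

lemma main_scan (f : Int → Option Char) (emb : Int × Int → R4) (k : Nat) :
    ∀ (lo : Int) (st : Option Int) (base : List R4) (out : List (Int × Int)),
    finishA emb (lo + k) ((PySem.List.pyRange lo (lo + k) 1).foldl (stepA f emb)
      (st, base ++ out.map emb))
    = base ++ (runsGo lo st out ((PySem.List.pyRange lo (lo + k) 1).map f)).map emb := by
  induction k with
  | zero =>
    intro lo st base out
    rw [PySem.List.pyRange_one_eq_nil (by omega)]
    cases st <;> simp [finishA, runsGo, List.map_append]
  | succ k ih =>
    intro lo st base out
    have hlt : lo < lo + ((k + 1 : Nat) : Int) := by push_cast; omega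
    have harg : lo + ((k + 1 : Nat) : Int) = (lo + 1) + (k : Int) := by push_cast; ring
    rw [PySem.List.pyRange_one_cons hlt, harg]
    simp only [List.foldl_cons, List.map_cons]
    cases hf : (f lo == some '.') with
    | true =>
      cases st with
      | none =>
        simp only [stepA, hf, if_true, runsGo]
        exact ih (lo + 1) (some lo) base out
      | some s =>
        simp only [stepA, hf, if_true, runsGo]
        exact ih (lo + 1) (some s) base out
    | false =>
      cases st with
      | none =>
        simp only [stepA, hf, Bool.false_eq_true, if_false, runsGo]
        exact ih (lo + 1) none base out
      | some s =>
        simp only [stepA, hf, Bool.false_eq_true, if_false, runsGo]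
        have hout : (base ++ out.map emb) ++ [emb (s, lo - 1)]
            = base ++ (out ++ [(s, lo - 1)]).map emb := by
          simp [List.map_append]
        rw [hout]
        exact ih (lo + 1) none base (out ++ [(s, lo - 1)])

lemma scanA_eq_runs (f : Int → Option Char) (emb : Int × Int → R4) (n : Int) (hn : 0 ≤ n)
    (acc : List R4) :
    scanA f emb n acc = acc ++ (runsB ((PySem.List.pyRange 0 n 1).map f)).map emb := by
  have h0 : n = 0 + ((n.toNat : Nat) : Int) := by omega
  rw [scanA, h0]
  have := main_scan f emb n.toNat 0 none acc []
  simpa [runsB] using this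

lemma extract_eq (A : List String) (N M : Int) (hN : 0 ≤ N) (hM : 0 ≤ M) :
    List.foldl (fun acc r => scanA (fun c => pvCell A r c) (fun p => (r, p.1, r, p.2)) M acc)
      (List.foldl (fun acc c => scanA (fun r => pvCell A r c) (fun p => (p.1, c, p.2, c)) N acc)
        [] (PySem.List.pyRange 0 M 1))
      (PySem.List.pyRange 0 N 1)
    = List.foldl (fun acc r => acc ++
        (runsB ((PySem.List.pyRange 0 M 1).map (fun c => pvCell A r c))).map
          (fun p => (r, p.1, r, p.2)))
      (List.foldl (fun acc c => acc ++
        (runsB ((PySem.List.pyRange 0 N 1).map (fun r => pvCell A r c))).map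
          (fun p => (p.1, c, p.2, c))) [] (PySem.List.pyRange 0 M 1))
      (PySem.List.pyRange 0 N 1) := by
  refine Eq.trans (PySem.List.foldl_congr_mem _ _ _ _ (fun acc r _ => scanA_eq_runs _ _ M hM acc)) ?_
  congr 1
  exact PySem.List.foldl_congr_mem _ _ _ _ (fun acc c _ => scanA_eq_runs _ _ N hN acc)

lemma solution_eq (A : List String) :
    solution A =
      outerA (PySem.List.sorted ((rectsOf A).map to5) (fun z => -(z.2.2.2.2)) false) 0 := by
  simp only [solution, rectsOf]
  have hN : (0 : Int) ≤ PySem.List.len A := by simp [PySem.List.len_eq]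
  have hM : (0 : Int) ≤ (match PySem.List.pyGet? A 0 with
      | none => 0 | some s => PySem.Str.len s) := by
    cases PySem.List.pyGet? A 0 <;> simp [PySem.Str.len_eq]
  rw [extract_eq A _ _ hN hM]; rfl

lemma alt_eq (A : List String) : solution_alt A = pairLoop (rectsOf A) 0 := rfl

lemma runsGo_wf (line : List (Option Char)) :
    ∀ (i : Int) (st : Option Int) (out : List (Int × Int)),
    (∀ p ∈ out, p.1 ≤ p.2) → (∀ s, st = some s → s < i) →
    ∀ p ∈ runsGo i st out line, p.1 ≤ p.2 := by
  induction line with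
  | nil =>
    intro i st out hout hst p hp
    cases st with
    | none => exact hout p hp
    | some s =>
      rcases List.mem_append.mp hp with h | h
      · exact hout p h
      · rcases List.mem_singleton.mp h with rfl
        have := hst s rfl; simp; omega
  | cons ch rest ih =>
    intro i st out hout hst p hp
    simp only [runsGo] at hp
    by_cases hc : (ch == some '.') = true
    · rw [if_pos hc] at hp
      cases st with
      | none =>
        refine ih (i + 1) (some i) out hout ?_ p hp
        intro s hs; cases hs; omega
      | some s =>
        refine ih (i + 1) (some s) out hout ?_ p hp
        intro s' hs'; cases hs'; have := hst s rfl; omega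
    · rw [if_neg hc] at hp
      cases st with
      | none =>
        exact ih (i + 1) none out hout (by intro s hs; cases hs) p hp
      | some s =>
        refine ih (i + 1) none (out ++ [(s, i - 1)]) ?_ (by intro s hs; cases hs) p hp
        intro q hq
        rcases List.mem_append.mp hq with h | h
        · exact hout q h
        · rcases List.mem_singleton.mp h with rfl
          have := hst s rfl; simp; omega

lemma runsB_le (line : List (Option Char)) : ∀ p ∈ runsB line, p.1 ≤ p.2 :=
  runsGo_wf line 0 none [] (by intro p hp; cases hp) (by intro s hs; cases hs)

lemma rects_wf (A : List String) : ∀ x ∈ rectsOf A, wf4 x := by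
  intro x hx
  simp only [rectsOf, PySem.List.foldl_append_eq_flatMap] at hx
  rcases List.mem_append.mp hx with h | h
  · rcases List.mem_append.mp h with h' | h'
    · cases h'
    · obtain ⟨c, _, hmem⟩ := List.mem_flatMap.mp h'
      obtain ⟨p, hp, rfl⟩ := List.mem_map.mp hmem
      exact ⟨runsB_le _ p hp, le_refl _⟩
  · obtain ⟨r, _, hmem⟩ := List.mem_flatMap.mp h
    obtain ⟨p, hp, rfl⟩ := List.mem_map.mp hmem
    exact ⟨le_refl _, runsB_le _ p hp⟩

lemma nonov4_symm {x y : R4} (h : nonov4 x y = true) : nonov4 y x = true := by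
  simp [nonov4] at *; omega

lemma nonov4_irrefl {x : R4} (h : wf4 x) : nonov4 x x = false := by
  obtain ⟨h1, h2⟩ := h; simp [nonov4]; omega

lemma nonov5_to5 (x y : R4) : nonov5 (to5 x) (to5 y) = nonov4 x y := rfl

-- ----- B side -----

lemma foldB_ge (a : R4) (ai : Int) (t : List R4) (m : Int) :
    m ≤ t.foldl (fun b x => if nonov4 a x then max b (ai + area4 x) else b) m := by
  induction t generalizing m with
  | nil => simp
  | cons b t ih =>
    simp only [List.foldl_cons]
    refine le_trans ?_ (ih _)
    by_cases h : nonov4 a b = true <;> simp [h]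

lemma foldB_pair (a : R4) (ai : Int) (t : List R4) (m : Int) {y : R4}
    (hy : y ∈ t) (hno : nonov4 a y = true) :
    ai + area4 y ≤ t.foldl (fun b x => if nonov4 a x then max b (ai + area4 x) else b) m := by
  induction t generalizing m with
  | nil => cases hy
  | cons b t ih =>
    simp only [List.foldl_cons]
    rcases List.mem_cons.mp hy with rfl | hy'
    · rw [if_pos hno]
      exact le_trans (le_max_right _ _) (foldB_ge a ai t _)
    · exact ih _ hy'

lemma cand_max (pool : List R4) {u v : Int} (hu : CandM pool u) (hv : CandM pool v) :
    CandM pool (max u v) := by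
  rcases le_total u v with h | h
  · rwa [max_eq_right h]
  · rwa [max_eq_left h]

lemma foldB_cand (pool : List R4) (a : R4) (ha : a ∈ pool) (t : List R4)
    (hsub : ∀ x ∈ t, x ∈ pool) {m : Int} (hm : CandM pool m) :
    CandM pool (t.foldl (fun b x => if nonov4 a x then max b (area4 a + area4 x) else b) m) := by
  induction t generalizing m with
  | nil => simpa
  | cons b t ih =>
    simp only [List.foldl_cons]
    refine ih (fun x hx => hsub x (List.mem_cons_of_mem _ hx)) ?_
    by_cases hb : nonov4 a b = true
    · rw [if_pos hb]
      exact cand_max pool hm (Or.inr (Or.inr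
        ⟨a, ha, b, hsub b (List.mem_cons_self), hb, rfl⟩))
    · rwa [if_neg hb]

lemma pairLoop_ge (t : List R4) (m : Int) : m ≤ pairLoop t m := by
  induction t generalizing m with
  | nil => simp [pairLoop]
  | cons a t ih =>
    simp only [pairLoop]
    exact le_trans (le_trans (le_max_left _ _) (foldB_ge a _ t _)) (ih _)

lemma pairLoop_single (t : List R4) (m : Int) {x : R4} (hx : x ∈ t) :
    area4 x ≤ pairLoop t m := by
  induction t generalizing m with
  | nil => cases hx
  | cons a t ih =>
    simp only [pairLoop]
    rcases List.mem_cons.mp hx with rfl | hx'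
    · exact le_trans (le_trans (le_max_right _ _) (foldB_ge x _ t _)) (pairLoop_ge t _)
    · exact ih _ hx'

lemma pairLoop_pair (t : List R4) (hwf : ∀ z ∈ t, wf4 z) {x y : R4}
    (hx : x ∈ t) (hy : y ∈ t) (hno : nonov4 x y = true) (m : Int) :
    area4 x + area4 y ≤ pairLoop t m := by
  induction t generalizing m with
  | nil => cases hx
  | cons a t ih =>
    simp only [pairLoop]
    rcases List.mem_cons.mp hx with rfl | hx' <;> rcases List.mem_cons.mp hy with h | hy'
    · rw [h] at hno
      rw [nonov4_irrefl (hwf _ hx)] at hno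
      cases hno
    · exact le_trans (foldB_pair x _ t _ hy' hno) (pairLoop_ge t _)
    · rw [← h] at *
      have : area4 x + area4 y = area4 y + area4 x := by ring
      rw [this]
      exact le_trans (foldB_pair y _ t _ hx' (nonov4_symm hno)) (pairLoop_ge t _)
    · exact ih (fun z hz => hwf z (List.mem_cons_of_mem _ hz)) hx' hy' _

lemma pairLoop_cand (pool : List R4) (t : List R4) (hsub : ∀ z ∈ t, z ∈ pool) {m : Int}
    (hm : CandM pool m) : CandM pool (pairLoop t m) := by
  induction t generalizing m with
  | nil => simpa [pairLoop]
  | cons a t ih =>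
    simp only [pairLoop]
    refine ih (fun z hz => hsub z (List.mem_cons_of_mem _ hz)) ?_
    exact foldB_cand pool a (hsub a List.mem_cons_self) t
      (fun z hz => hsub z (List.mem_cons_of_mem _ hz))
      (cand_max pool hm (Or.inr (Or.inl ⟨a, hsub a List.mem_cons_self, rfl⟩)))

-- ----- A side -----

lemma innerA_ge (a : R5) (t : List R5) (m : Int) : m ≤ innerA a m t := by
  induction t generalizing m with
  | nil => simp [innerA]
  | cons b t ih =>
    simp only [innerA]
    by_cases hb : nonov5 a b = true
    · simp [hb]
    · rw [if_neg hb]; exact ih _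

lemma innerA_first (a : R5) (t : List R5)
    (hsort : t.Pairwise (fun u w => w.2.2.2.2 ≤ u.2.2.2.2)) {y : R5}
    (hy : y ∈ t) (hno : nonov5 a y = true) (m : Int) :
    a.2.2.2.2 + y.2.2.2.2 ≤ innerA a m t := by
  induction t generalizing m with
  | nil => cases hy
  | cons b t ih =>
    rcases List.pairwise_cons.mp hsort with ⟨hhead, htail⟩
    simp only [innerA]
    by_cases hb : nonov5 a b = true
    · rw [if_pos hb]
      rcases List.mem_cons.mp hy with rfl | hy'
      · exact le_max_right _ _
      · exact le_trans (by have := hhead y hy'; omega) (le_max_right _ _)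
    · rw [if_neg hb]
      rcases List.mem_cons.mp hy with rfl | hy'
      · rw [hno] at hb; cases hb rfl
      · exact ih htail hy' _

lemma innerA_cand (pool : List R4) {x : R4} (hx : x ∈ pool) (t : List R5)
    (hsub : ∀ z ∈ t, ∃ u ∈ pool, z = to5 u) {m : Int} (hm : CandM pool m) :
    CandM pool (innerA (to5 x) m t) := by
  induction t generalizing m with
  | nil => simpa [innerA]
  | cons b t ih =>
    obtain ⟨u, hu, rfl⟩ := hsub b List.mem_cons_self
    simp only [innerA]
    by_cases hb : nonov5 (to5 x) (to5 u) = true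
    · rw [if_pos hb]
      rw [nonov5_to5] at hb
      exact cand_max pool hm (Or.inr (Or.inr ⟨x, hx, u, hu, hb, rfl⟩))
    · rw [if_neg hb]
      exact ih (fun z hz => hsub z (List.mem_cons_of_mem _ hz)) hm

lemma outerA_ge (t : List R5) (m : Int) : m ≤ outerA t m := by
  induction t generalizing m with
  | nil => simp [outerA]
  | cons a t ih =>
    simp only [outerA]
    exact le_trans (le_trans (le_max_left _ _) (innerA_ge a t _)) (ih _)

lemma outerA_single (t : List R5) (m : Int) {z : R5} (hz : z ∈ t) :
    z.2.2.2.2 ≤ outerA t m := by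
  induction t generalizing m with
  | nil => cases hz
  | cons a t ih =>
    simp only [outerA]
    rcases List.mem_cons.mp hz with rfl | hz'
    · exact le_trans (le_trans (le_max_right _ _) (innerA_ge z t _)) (outerA_ge t _)
    · exact ih _ hz'

lemma nonov5_symm {x y : R5} (h : nonov5 x y = true) : nonov5 y x = true := by
  simp [nonov5] at *; omega

lemma outerA_pair (t : List R5)
    (hsort : t.Pairwise (fun u w => w.2.2.2.2 ≤ u.2.2.2.2))
    (hirr : ∀ z ∈ t, nonov5 z z = false) {z w : R5}
    (hz : z ∈ t) (hw : w ∈ t) (hno : nonov5 z w = true) (m : Int) :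
    z.2.2.2.2 + w.2.2.2.2 ≤ outerA t m := by
  induction t generalizing m with
  | nil => cases hz
  | cons a t ih =>
    rcases List.pairwise_cons.mp hsort with ⟨_, htail⟩
    simp only [outerA]
    rcases List.mem_cons.mp hz with rfl | hz' <;> rcases List.mem_cons.mp hw with h | hw'
    · rw [h] at hno
      rw [hirr _ List.mem_cons_self] at hno
      cases hno
    · exact le_trans (innerA_first z t htail hw' hno _) (outerA_ge t _)
    · rw [← h] at *
      have hcomm : z.2.2.2.2 + w.2.2.2.2 = w.2.2.2.2 + z.2.2.2.2 := by ring
      rw [hcomm]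
      exact le_trans (innerA_first w t htail hz' (nonov5_symm hno) _) (outerA_ge t _)
    · exact ih htail (fun u hu => hirr u (List.mem_cons_of_mem _ hu)) hz' hw' _

lemma outerA_cand (pool : List R4) (t : List R5)
    (hsub : ∀ z ∈ t, ∃ u ∈ pool, z = to5 u) {m : Int} (hm : CandM pool m) :
    CandM pool (outerA t m) := by
  induction t generalizing m with
  | nil => simpa [outerA]
  | cons a t ih =>
    obtain ⟨u, hu, rfl⟩ := hsub a List.mem_cons_self
    simp only [outerA]
    refine ih (fun z hz => hsub z (List.mem_cons_of_mem _ hz)) ?_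
    exact innerA_cand pool hu t (fun z hz => hsub z (List.mem_cons_of_mem _ hz))
      (cand_max pool hm (Or.inr (Or.inl ⟨u, hu, rfl⟩)))

-- ===== VERDICT (by name: the statement is the Claim_ definition above) =====
theorem solution_spec : Claim_equal_solution := by
  intro A _ _
  unfold Spec_solution
  rw [solution_eq, alt_eq]
  have hwf := rects_wf A
  have hmemS : ∀ z ∈ PySem.List.sorted ((rectsOf A).map to5) (fun z => -(z.2.2.2.2)) false,
      ∃ u ∈ rectsOf A, z = to5 u := by
    intro z hz
    rw [PySem.List.mem_sorted] at hz
    obtain ⟨u, hu, h⟩ := List.mem_map.mp hz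
    exact ⟨u, hu, h.symm⟩
  have hsort : (PySem.List.sorted ((rectsOf A).map to5) (fun z => -(z.2.2.2.2)) false).Pairwise
      (fun u w => w.2.2.2.2 ≤ u.2.2.2.2) := by
    have := PySem.List.sorted_pairwise (xs := (rectsOf A).map to5)
      (key := fun z => -(z.2.2.2.2))
    exact this.imp (by intro a b h; omega)
  have hirr : ∀ z ∈ PySem.List.sorted ((rectsOf A).map to5) (fun z => -(z.2.2.2.2)) false,
      nonov5 z z = false := by
    intro z hz
    obtain ⟨u, hu, rfl⟩ := hmemS z hz
    rw [nonov5_to5]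
    exact nonov4_irrefl (hwf u hu)
  have hAc : CandM (rectsOf A) (outerA (PySem.List.sorted ((rectsOf A).map to5)
      (fun z => -(z.2.2.2.2)) false) 0) :=
    outerA_cand (rectsOf A) _ hmemS (Or.inl rfl)
  have hBc : CandM (rectsOf A) (pairLoop (rectsOf A) 0) :=
    pairLoop_cand (rectsOf A) (rectsOf A) (fun z h => h) (Or.inl rfl)
  apply le_antisymm
  · rcases hAc with h0 | ⟨x, hx, h⟩ | ⟨x, hx, y, hy, hno, h⟩
    · rw [h0]; exact pairLoop_ge _ 0
    · rw [h]; exact pairLoop_single _ 0 hx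
    · rw [h]; exact pairLoop_pair _ hwf hx hy hno 0
  · rcases hBc with h0 | ⟨x, hx, h⟩ | ⟨x, hx, y, hy, hno, h⟩
    · rw [h0]; exact outerA_ge _ 0
    · rw [h]
      have hz : to5 x ∈ PySem.List.sorted ((rectsOf A).map to5) (fun z => -(z.2.2.2.2)) false := by
        rw [PySem.List.mem_sorted]
        exact List.mem_map_of_mem hx
      exact outerA_single _ 0 hz
    · rw [h]
      have hzx : to5 x ∈ PySem.List.sorted ((rectsOf A).map to5) (fun z => -(z.2.2.2.2)) false := by
        rw [PySem.List.mem_sorted]; exact List.mem_map_of_mem hx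
      have hzy : to5 y ∈ PySem.List.sorted ((rectsOf A).map to5) (fun z => -(z.2.2.2.2)) false := by
        rw [PySem.List.mem_sorted]; exact List.mem_map_of_mem hy
      exact outerA_pair _ hsort hirr hzx hzy (by rw [nonov5_to5]; exact hno) 0
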